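-- pv_equiv track=rewrite | github.com/jonathanhook/advent-2024 | 9/day9_part2.py | find_next_file
-- ===== SOURCE A (Python) =====
-- def find_next_file(disk: list[str], ptr: int) -> tuple[str, int, int]:
--     f_id: str = ''
--     f_start = 0
--     f_size: int = 0
--     while ptr >= 0:
--         if f_id == '' and disk[ptr] != '.':
--             f_id = disk[ptr]
--             f_start = ptr
--             f_size = 1
--         elif f_id != '':
--             if disk[ptr] != f_id:
--                 break
--             else:
--                 f_size += 1
--                 f_start -= 1
--
--         ptr -= 1
--     return f_id, f_start, f_size
-- ===== SOURCE B (Python) =====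
-- def find_next_file(disk: list[str], ptr: int) -> tuple[str, int, int]:
--     # Single forward pass over disk[:ptr+1], tracking the current run of equal
--     # values and the best (= last) non-'.' run seen so far.
--     best = ('', 0, 0)
--     run_id = None
--     run_start = 0
--     for i in range(ptr + 1):
--         c = disk[i]
--         if c != run_id:
--             run_id, run_start = c, i
--         if c != '.':
--             best = (c, run_start, i - run_start + 1)
--     return best
-- ===== Notes on version B (the rewrite author's own statement) =====
-- stated objective: alternative
-- what changed: Replaces A's backward scan with early break (empty-string sentinel, in-place f_start/f_size counters) by a single FORWARD pass over disk[:ptr+1] that tracks the current run of equal values and keeps the last non-'.' run seen as the answer.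
-- outside the precondition, e.g. on find_next_file(['x', ''], 1): A returns ('x', 0, 1), B returns ('', 1, 1); on find_next_file(['', ''], 1): A returns ('', 0, 1), B returns ('', 0, 2)
import Mathlib
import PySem

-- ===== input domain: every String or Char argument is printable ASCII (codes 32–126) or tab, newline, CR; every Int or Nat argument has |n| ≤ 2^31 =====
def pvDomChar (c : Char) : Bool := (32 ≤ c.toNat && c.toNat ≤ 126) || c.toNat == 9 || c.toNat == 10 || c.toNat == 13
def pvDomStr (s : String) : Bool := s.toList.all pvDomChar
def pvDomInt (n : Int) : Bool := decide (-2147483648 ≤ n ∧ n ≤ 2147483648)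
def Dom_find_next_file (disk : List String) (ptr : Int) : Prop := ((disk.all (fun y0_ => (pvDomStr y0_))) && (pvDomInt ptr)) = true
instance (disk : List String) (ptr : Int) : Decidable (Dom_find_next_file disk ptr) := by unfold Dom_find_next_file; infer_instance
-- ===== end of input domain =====

-- B replaces A's backward scan-with-break by one forward pass over disk[:ptr+1] keeping the
-- last non-'.' run seen; objective: alternative (same cost, different traversal).


-- ===== PORT A =====
-- cited by the ports' decreasing_by (keeps the termination proof term small)
theorem pvDecStep {p : Int} (h : 0 ≤ p) : (p - 1 + 1).toNat < (p + 1).toNat := by omega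

-- A's while-loop as structural recursion over the decreasing ptr; state (f_id, f_start, f_size).
-- pyGet? = none is Python's IndexError (excluded by Pre_); the current state is returned there.
def findLoopA (disk : List String) (fid : String) (fstart fsize ptr : Int) :
    String × Int × Int :=
  if _h : 0 ≤ ptr then
    match PySem.List.pyGet? disk ptr with
    | none => (fid, fstart, fsize)   -- IndexError in Python; unreachable under Pre_
    | some c =>
      if fid = "" ∧ c ≠ "." then findLoopA disk c ptr 1 (ptr - 1)
      else if fid ≠ "" then
        if c ≠ fid then (fid, fstart, fsize)            -- break
        else findLoopA disk fid (fstart - 1) (fsize + 1) (ptr - 1)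
      else findLoopA disk fid fstart fsize (ptr - 1)
  else (fid, fstart, fsize)
termination_by (ptr + 1).toNat
decreasing_by all_goals exact pvDecStep _h

def find_next_file (disk : List String) (ptr : Int) : String × Int × Int :=
  findLoopA disk "" 0 0 ptr

-- ===== PORT B =====
-- B's for-loop body: state = (best, run_id, run_start); run_id is Option (Python's None start).
def stepB (disk : List String) (st : (String × Int × Int) × Option String × Int) (i : Int) :
    (String × Int × Int) × Option String × Int :=
  match PySem.List.pyGet? disk i with
  | none => st                      -- IndexError in Python; unreachable under Pre_
  | some c =>
    let best := st.1
    let runId := st.2.1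
    let runStart := st.2.2
    let rs' := if some c ≠ runId then (some c, i) else (runId, runStart)
    let best' := if c ≠ "." then (c, rs'.2, i - rs'.2 + 1) else best
    (best', rs')

def find_next_file_alt (disk : List String) (ptr : Int) : String × Int × Int :=
  ((PySem.List.pyRange 0 (ptr + 1) 1).foldl (stepB disk) (("", 0, 0), none, 0)).1

-- ===== PRECONDITION & SPEC =====
-- Pre_ excludes (a) ptr ≥ len(disk), where both Pythons raise IndexError, and (b) inputs whose
-- first non-'.' block scanning backward from ptr is the empty string: there A's use of '' as its
-- not-yet-found sentinel conflates that block with 'nothing found yet' and keeps scanning,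
-- while B reports the empty-id run; '' is no valid block id and neither value is specified.
def Pre_find_next_file (disk : List String) (ptr : Int) : Prop :=
  ptr < disk.length ∧
  ∀ i ∈ List.range disk.length, ((i : Int) ≤ ptr ∧ disk[i]? = some "") →
    ∃ j ∈ List.range disk.length, i < j ∧ (j : Int) ≤ ptr ∧ disk[j]? ≠ some "." 
instance (disk : List String) (ptr : Int) : Decidable (Pre_find_next_file disk ptr) := by
  unfold Pre_find_next_file; infer_instance

def pvWitness_find_next_file : List String × Int := (["0", "0", ".", "1"], 3)

def Spec_find_next_file (disk : List String) (ptr : Int) (out : String × Int × Int) : Prop :=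
  out = find_next_file_alt disk ptr
instance (disk : List String) (ptr : Int) (out : String × Int × Int) :
    Decidable (Spec_find_next_file disk ptr out) := by unfold Spec_find_next_file; infer_instance

-- ===== CLAIM (what is proved, stated in full; the proofs are below) =====
def Claim_equal_find_next_file : Prop := ∀ (disk : List String) (ptr : Int), Dom_find_next_file disk ptr → Pre_find_next_file disk ptr → Spec_find_next_file disk ptr (find_next_file disk ptr)

-- ===== LEMMAS AND PROOFS =====

-- Proof-side middle form: backward skip-dots, then backward run walk (used by no port).
def skipDots (disk : List String) (ptr : Int) : Int :=
  if _h : 0 ≤ ptr then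
    match PySem.List.pyGet? disk ptr with
    | none => ptr
    | some c => if c = "." then skipDots disk (ptr - 1) else ptr
  else ptr
termination_by (ptr + 1).toNat
decreasing_by all_goals exact pvDecStep _h

def walkRun (disk : List String) (fid : String) (ptr : Int) : Int :=
  if _h : 0 ≤ ptr then
    match PySem.List.pyGet? disk ptr with
    | none => ptr
    | some c => if c = fid then walkRun disk fid (ptr - 1) else ptr
  else ptr
termination_by (ptr + 1).toNat
decreasing_by all_goals exact pvDecStep _h

def midB (disk : List String) (ptr : Int) : String × Int × Int :=
  let p := skipDots disk ptr
  if p < 0 then ("", 0, 0)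
  else
    match PySem.List.pyGet? disk p with
    | none => ("", 0, 0)
    | some fid =>
      let q := walkRun disk fid p
      (fid, q + 1, p - q)

theorem pyGet?_some_of_lt (disk : List String) (ptr : Int) (h0 : 0 ≤ ptr)
    (h1 : ptr < disk.length) : ∃ c, PySem.List.pyGet? disk ptr = some c ∧ c ∈ disk := by
  rcases Option.eq_none_or_eq_some (PySem.List.pyGet? disk ptr) with h | ⟨c, h⟩
  · rw [PySem.List.pyGet?_eq_none_iff] at h
    exact absurd (by constructor <;> omega) h
  · exact ⟨c, h, PySem.List.mem_of_pyGet?_eq_some disk h⟩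

-- ---- A-side: A's loop equals midB under Pre_ ----

theorem run_phase (disk : List String) (fid : String) (hfid : fid ≠ "") :
    ∀ (n : Nat) (ptr fstart fsize : Int), (ptr + 1).toNat ≤ n → ptr < disk.length →
      findLoopA disk fid fstart fsize ptr =
        (fid, fstart - (ptr - walkRun disk fid ptr), fsize + (ptr - walkRun disk fid ptr)) := by
  intro n
  induction n with
  | zero =>
    intro ptr fstart fsize hn hlen
    have hneg : ¬ 0 ≤ ptr := by omega
    rw [findLoopA, walkRun]
    simp [hneg]
  | succ n ih =>
    intro ptr fstart fsize hn hlen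
    by_cases h0 : 0 ≤ ptr
    · obtain ⟨c, hc, -⟩ := pyGet?_some_of_lt disk ptr h0 hlen
      rw [findLoopA, walkRun]
      simp only [h0, dif_pos, hc]
      by_cases hcf : c = fid
      · subst hcf
        rw [if_neg (by simp [hfid]), if_pos hfid, if_neg (by simp)]
        rw [ih (ptr - 1) (fstart - 1) (fsize + 1) (by omega) (by omega)]
        simp only [Prod.mk.injEq]
        refine ⟨by trivial, ?_, ?_⟩ <;> · rw [if_pos (by trivial)]; ring
      · rw [if_neg (by simp [hfid]), if_pos hfid, if_pos hcf,
          if_neg (by simp [hcf])]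
        simp
    · rw [findLoopA, walkRun]
      simp [h0]

theorem dot_phase (disk : List String) :
    ∀ (n : Nat) (ptr : Int), (ptr + 1).toNat ≤ n → ptr < disk.length →
      (∀ i ∈ List.range disk.length, ((i : Int) ≤ ptr ∧ disk[i]? = some "") →
        ∃ j ∈ List.range disk.length, i < j ∧ (j : Int) ≤ ptr ∧ disk[j]? ≠ some ".") →
      findLoopA disk "" 0 0 ptr = midB disk ptr := by
  intro n
  induction n with
  | zero =>
    intro ptr hn hlen hgood
    have hneg : ¬ 0 ≤ ptr := by omega
    rw [findLoopA, midB, skipDots]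
    simp [hneg, show ptr < 0 by omega]
  | succ n ih =>
    intro ptr hn hlen hgood
    by_cases h0 : 0 ≤ ptr
    · obtain ⟨c, hc, hmem⟩ := pyGet?_some_of_lt disk ptr h0 hlen
      have hcg : disk[ptr.toNat]? = some c := by
        rw [← PySem.List.pyGet?_of_nonneg disk h0]; exact hc
      by_cases hdot : c = "."
      · rw [findLoopA]
        simp only [h0, dif_pos, hc]
        rw [if_neg (by simp [hdot]), if_neg (by simp)]
        have hgood' : ∀ i ∈ List.range disk.length, ((i : Int) ≤ ptr - 1 ∧ disk[i]? = some "") →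
            ∃ j ∈ List.range disk.length, i < j ∧ (j : Int) ≤ ptr - 1 ∧ disk[j]? ≠ some "." := by
          intro i hi ⟨hile, hie⟩
          obtain ⟨j, hj, hij, hjle, hjd⟩ := hgood i hi ⟨by omega, hie⟩
          refine ⟨j, hj, hij, ?_, hjd⟩
          rcases lt_or_eq_of_le hjle with h | h
          · omega
          · exfalso
            have : j = ptr.toNat := by omega
            rw [this, hcg] at hjd
            exact hjd (by rw [hdot])
        rw [ih (ptr - 1) (by omega) (by omega) hgood']
        have hs : skipDots disk ptr = skipDots disk (ptr - 1) := by
          conv_lhs => rw [skipDots]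
          simp [h0, hc, hdot]
        simp only [midB, hs]
      · have hcne : c ≠ "" := by
          intro hce
          obtain ⟨j, hj, hij, hjle, -⟩ :=
            hgood ptr.toNat (by simp [List.mem_range]; omega) ⟨by omega, by rw [hcg, hce]⟩
          omega
        rw [findLoopA]
        simp only [h0, dif_pos, hc]
        rw [if_pos (show True ∧ c ≠ "." from ⟨trivial, hdot⟩)]
        rw [run_phase disk c hcne ((ptr - 1) + 1).toNat (ptr - 1) ptr 1 (le_refl _) (by omega)]
        rw [midB]
        have hskip : skipDots disk ptr = ptr := by
          rw [skipDots]; simp [h0, hc, hdot]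
        have hwalk : walkRun disk c ptr = walkRun disk c (ptr - 1) := by
          rw [walkRun]; simp [h0, hc]
        simp only [hskip, hc]
        rw [if_neg (by omega), hwalk]
        simp only [Prod.mk.injEq]
        refine ⟨by trivial, by ring, by ring⟩
    · rw [findLoopA, midB, skipDots]
      simp [h0, show ptr < 0 by omega]

-- ---- B-side: the forward fold's state after k steps, characterised by midB/walkRun ----

def stateAt (disk : List String) (k : Nat) : (String × Int × Int) × Option String × Int :=
  if k = 0 then (("", 0, 0), none, 0)
  else
    match PySem.List.pyGet? disk ((k : Int) - 1) with
    | none => (("", 0, 0), none, 0)   -- unreachable for k ≤ disk.length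
    | some c => (midB disk ((k : Int) - 1), some c, walkRun disk c ((k : Int) - 1) + 1)

theorem step_state (disk : List String) (k : Nat) (hk : k < disk.length) :
    stepB disk (stateAt disk k) (k : Int) = stateAt disk (k + 1) := by
  obtain ⟨c, hc, -⟩ := pyGet?_some_of_lt disk (k : Int) (by omega) (by omega)
  have hs1 : stateAt disk (k + 1) = (midB disk (k : Int), some c, walkRun disk c (k : Int) + 1) := by
    unfold stateAt
    rw [if_neg (Nat.succ_ne_zero k), show (((k + 1 : Nat)) : Int) - 1 = (k : Int) by push_cast; ring, hc]
  rw [hs1]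
  rcases Nat.eq_zero_or_pos k with hk0 | hkpos
  · subst hk0
    have hc0 : PySem.List.pyGet? disk 0 = some c := by simpa using hc
    have hw0 : walkRun disk c 0 = -1 := by
      rw [walkRun]; simp only [le_refl, dif_pos, hc0, if_pos rfl]
      rw [walkRun]; norm_num
    have hst0 : stateAt disk 0 = (("", 0, 0), none, 0) := by unfold stateAt; simp
    have hsk0 : skipDots disk 0 = if c = "." then -1 else 0 := by
      rw [skipDots]; simp only [le_refl, dif_pos, hc0]
      split_ifs with h
      · rw [skipDots]; norm_num
      · rfl
    rw [hst0]
    simp only [Nat.cast_zero, stepB, hc0]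
    by_cases hdot : c = "."
    · have hmb : midB disk 0 = ("", 0, 0) := by
        rw [midB]; simp [hsk0, hdot]
      subst hdot
      simp [hmb, hw0]
    · have hmb : midB disk 0 = (c, 0, 1) := by
        rw [midB]; simp [hsk0, hdot, hc0, hw0]
      simp [hdot, hmb, hw0]
  · obtain ⟨b, hb, -⟩ := pyGet?_some_of_lt disk ((k : Int) - 1) (by omega) (by omega)
    have hkne : k ≠ 0 := by omega
    have hst : stateAt disk k =
        (midB disk ((k : Int) - 1), some b, walkRun disk b ((k : Int) - 1) + 1) := by
      unfold stateAt; rw [if_neg hkne, hb]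
    have hwK : walkRun disk c (k : Int) = walkRun disk c ((k : Int) - 1) := by
      rw [walkRun]
      simp [show (0 : Int) ≤ (k : Int) by omega, hc]
    have hrs : (if some c ≠ some b then ((some c : Option String), (k : Int))
        else (some b, walkRun disk b ((k : Int) - 1) + 1)) =
        (some c, walkRun disk c (k : Int) + 1) := by
      by_cases hcb : c = b
      · subst hcb
        rw [if_neg (by simp), hwK]
      · rw [if_pos (by simp [hcb]), hwK]
        have : walkRun disk c ((k : Int) - 1) = (k : Int) - 1 := by
          rw [walkRun]
          simp only [show (0 : Int) ≤ (k : Int) - 1 by omega, dif_pos, hb]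
          rw [if_neg (by intro h; exact hcb h.symm)]
        rw [this]; norm_num
    rw [hst]
    simp only [stepB, hc, hrs]
    by_cases hdot : c = "."
    · have hsk : skipDots disk (k : Int) = skipDots disk ((k : Int) - 1) := by
        rw [skipDots]
        simp only [show (0 : Int) ≤ (k : Int) by omega, dif_pos, hc, if_pos hdot]
      rw [if_neg (not_not_intro hdot)]
      simp only [midB, hsk]
    · have hsk : skipDots disk (k : Int) = (k : Int) := by
        rw [skipDots]
        simp only [show (0 : Int) ≤ (k : Int) by omega, dif_pos, hc, if_neg hdot]
      rw [if_pos hdot]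
      have hmb : midB disk (k : Int) =
          (c, walkRun disk c (k : Int) + 1, (k : Int) - walkRun disk c (k : Int)) := by
        rw [midB]
        simp only [hsk, if_neg (show ¬ (k : Int) < 0 by omega), hc]
      rw [hmb,
        show (k : Int) - (walkRun disk c (k : Int) + 1) + 1 = (k : Int) - walkRun disk c (k : Int)
          by ring]

theorem foldB (disk : List String) :
    ∀ (k : Nat), k ≤ disk.length →
      (PySem.List.pyRange 0 (k : Int) 1).foldl (stepB disk) (("", 0, 0), none, 0) =
        stateAt disk k := by
  intro k
  induction k with
  | zero =>
    intro _
    rw [PySem.List.pyRange_one_eq_nil (by omega)]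
    simp [stateAt]
  | succ k ih =>
    intro hk
    have hrange : PySem.List.pyRange 0 (((k + 1 : Nat)) : Int) 1 =
        PySem.List.pyRange 0 (k : Int) 1 ++ [(k : Int)] := by
      rw [show (((k + 1 : Nat)) : Int) = (k : Int) + 1 by push_cast; ring]
      exact PySem.List.pyRange_one_succ_right (by omega)
    rw [hrange, List.foldl_append, ih (by omega)]
    simp only [List.foldl_cons, List.foldl_nil]
    exact step_state disk k (by omega)

theorem alt_eq_midB (disk : List String) (ptr : Int) (hlen : ptr < disk.length) :
    find_next_file_alt disk ptr = midB disk ptr := by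
  rw [find_next_file_alt]
  by_cases h0 : 0 ≤ ptr
  · have hk : ((ptr + 1).toNat : Int) = ptr + 1 := by omega
    rw [show ptr + 1 = ((ptr + 1).toNat : Int) from hk.symm,
      foldB disk (ptr + 1).toNat (by omega)]
    have hkne : (ptr + 1).toNat ≠ 0 := by omega
    obtain ⟨c, hc, -⟩ := pyGet?_some_of_lt disk ptr h0 hlen
    have : stateAt disk (ptr + 1).toNat = (midB disk ptr, some c, walkRun disk c ptr + 1) := by
      unfold stateAt
      rw [if_neg hkne, show ((ptr + 1).toNat : Int) - 1 = ptr by omega, hc]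
    rw [this]
  · rw [PySem.List.pyRange_one_eq_nil (by omega)]
    rw [midB, skipDots]
    simp [show ¬ (0:Int) ≤ ptr from h0, show ptr < 0 by omega]

-- ===== VERDICT (by name: the statement is the Claim_ definition above) =====
theorem find_next_file_spec : Claim_equal_find_next_file := by
  intro disk ptr _ hpre
  unfold Spec_find_next_file find_next_file
  rw [alt_eq_midB disk ptr hpre.1]
  exact dot_phase disk (ptr + 1).toNat ptr (le_refl _) hpre.1 hpre.2
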